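-- pv_equiv track=rewrite | github.com/golsachamani/Quera | 17675.py | generate_signs
-- ===== SOURCE A (Python) =====
-- def is_fibonacci(num):
--     fibs = [1, 2]
--     while fibs[-1] < num:
--         fibs.append(fibs[-1] + fibs[-2])
--     return num in fibs
--
-- def generate_signs(n):
--     signs = []
--     for i in range(1, n + 1):
--         if is_fibonacci(i):
--             signs.append('+')
--         else:
--             signs.append('-')
--     return ''.join(signs)
-- ===== SOURCE B (Python) =====
-- def generate_signs(n):
--     signs = ['-'] * n
--     a, b = 1, 2
--     while a <= n:
--         signs[a - 1] = '+'
--         a, b = b, a + b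
--     return ''.join(signs)
-- ===== Notes on version B (the rewrite author's own statement) =====
-- stated objective: faster
-- what changed: Instead of testing every position 1..n for Fibonacci membership by regenerating the Fibonacci list each time, B allocates n '-' characters once and walks the Fibonacci sequence a,b=1,2 marking only the O(log n) Fibonacci positions with '+'.
import Mathlib
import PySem

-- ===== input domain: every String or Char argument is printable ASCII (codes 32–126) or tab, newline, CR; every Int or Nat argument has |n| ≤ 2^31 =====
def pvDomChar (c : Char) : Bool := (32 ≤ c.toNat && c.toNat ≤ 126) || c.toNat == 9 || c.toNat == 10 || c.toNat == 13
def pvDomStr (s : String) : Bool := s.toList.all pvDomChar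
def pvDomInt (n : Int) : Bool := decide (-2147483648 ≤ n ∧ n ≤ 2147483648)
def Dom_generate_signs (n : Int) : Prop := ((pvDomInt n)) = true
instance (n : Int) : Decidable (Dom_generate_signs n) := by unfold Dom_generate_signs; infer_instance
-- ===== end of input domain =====

-- B replaces A's per-position Fibonacci membership test (which rebuilds the whole
-- Fibonacci list for every i) by one '-'-filled buffer in which only the Fibonacci
-- positions are overwritten with '+' while walking the sequence once: faster.

-- ===== PORT A =====
-- 'while fibs[-1] < num: fibs.append(fibs[-1] + fibs[-2])', as recursion on a fuel
-- counter (a totality guard only: each pass grows fibs[-1] by fibs[-2] ≥ 1, so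
-- num.toNat passes always reach fibs[-1] ≥ num and the guard never cuts the loop
-- short; proved in mem_pvFibLoop / is_fibonacci_iff below).  fibs[-1] / fibs[-2]
-- are always in range (the list always has ≥ 2 elements): read as getLastD /
-- dropLast.getLastD.
def pvFibLoop (num : Int) : Nat → List Int → List Int
  | 0, fibs => fibs
  | t + 1, fibs =>
    if fibs.getLastD 0 < num then
      pvFibLoop num t (fibs ++ [fibs.getLastD 0 + fibs.dropLast.getLastD 0])
    else fibs

def is_fibonacci (num : Int) : Bool :=
  (pvFibLoop num num.toNat [1, 2]).contains num

def generate_signs (n : Int) : String :=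
  let signs : List String :=
    (PySem.List.pyRange 1 (n + 1) 1).foldl
      (fun acc i => acc ++ [if is_fibonacci i then "+" else "-"]) []
  PySem.Str.join "" signs

-- ===== PORT B =====
-- 'while a <= n: signs[a-1] = '+'; a, b = b, a+b', as recursion on a fuel counter
-- (a totality guard only: a grows by at least 1 per pass, so n.toNat passes always
-- reach a > n; proved in the pvMarkLoop lemmas below).  The index a-1 is always in
-- range when 1 ≤ a ≤ n (list length n).  ''.join of a list of single-character
-- strings is String.ofList of those characters (exact).
def pvMarkLoop (n : Int) : Nat → Int → Int → List Char → List Char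
  | 0, _, _, signs => signs
  | t + 1, a, b, signs =>
    if a ≤ n then pvMarkLoop n t b (a + b) (signs.set (a - 1).toNat '+') else signs

def generate_signs_alt (n : Int) : String :=
  String.ofList (pvMarkLoop n n.toNat 1 2 (List.replicate n.toNat '-'))

-- ===== PRECONDITION & SPEC =====
def Spec_generate_signs (n : Int) (out : String) : Prop := out = generate_signs_alt n
instance (n : Int) (out : String) : Decidable (Spec_generate_signs n out) := by unfold Spec_generate_signs; infer_instance

-- ===== CLAIM (what is proved, stated in full; the proofs are below) =====
def Claim_equal_generate_signs : Prop := ∀ (n : Int), Dom_generate_signs n → Spec_generate_signs n (generate_signs n)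

-- ===== LEMMAS AND PROOFS =====

-- The reference Fibonacci sequence 1, 2, 3, 5, 8, …
def fibA : Nat → Int
  | 0 => 1
  | 1 => 2
  | k + 2 => fibA k + fibA (k + 1)

theorem fibA_grow : ∀ k, 1 ≤ fibA k ∧ fibA k < fibA (k + 1) := by
  intro k
  induction k using Nat.twoStepInduction with
  | zero => decide
  | one => decide
  | more k ih1 ih2 => simp only [fibA] at *; omega

theorem fibA_strictMono : StrictMono fibA :=
  strictMono_nat_of_lt_succ (fun k => (fibA_grow k).2)

theorem fibA_ge_of_le (j k : Nat) (h : k ≤ j) : fibA k ≤ fibA j :=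
  fibA_strictMono.monotone h

theorem fibA_step (k : Nat) : fibA k + fibA (k + 1) = fibA (k + 1 + 1) := by
  simp [fibA]

theorem range_map_last (k : Nat) : ((List.range (k + 1)).map fibA).getLastD 0 = fibA k := by
  simp [List.range_succ]

theorem range_map_dropLast (k : Nat) :
    ((List.range (k + 1)).map fibA).dropLast = (List.range k).map fibA := by
  simp [List.range_succ]

-- A's list [1,2] extended: membership in the extension ↔ num is some fibA j
-- (for any fuel t that lets the loop run to its natural stop).
theorem mem_pvFibLoop (num : Int) :
    ∀ t k, (num - fibA (k + 1)).toNat ≤ t →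
      (num ∈ pvFibLoop num t ((List.range (k + 2)).map fibA) ↔ ∃ j, fibA j = num) := by
  intro t
  induction t with
  | zero =>
    intro k hm
    simp only [pvFibLoop]
    constructor
    · rintro hmem
      rcases List.mem_map.mp hmem with ⟨j, _, hj⟩
      exact ⟨j, hj⟩
    · rintro ⟨j, hj⟩
      refine List.mem_map.mpr ⟨j, List.mem_range.mpr ?_, hj⟩
      by_contra hge
      have hlt : fibA (k + 1) < fibA j := fibA_strictMono (show k + 1 < j by omega)
      omega
  | succ t ih =>
    intro k hm
    rw [pvFibLoop]
    by_cases hlt : ((List.range (k + 2)).map fibA).getLastD 0 < num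
    · rw [if_pos hlt]
      have hlast := range_map_last (k + 1)
      have hsec : ((List.range (k + 2)).map fibA).dropLast.getLastD 0 = fibA k := by
        rw [range_map_dropLast, range_map_last]
      have hL : (List.range (k + 2)).map fibA ++
            [((List.range (k + 2)).map fibA).getLastD 0 +
              ((List.range (k + 2)).map fibA).dropLast.getLastD 0]
          = (List.range (k + 3)).map fibA := by
        rw [hlast, hsec, show List.range (k + 3) = List.range (k + 2) ++ [k + 2] from
          List.range_succ]
        simp [fibA, Int.add_comm]
      rw [hL]
      refine ih (k + 1) ?_
      rw [hlast] at hlt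
      have := (fibA_grow (k + 2)).2
      have := (fibA_grow (k + 1)).2
      omega
    · rw [if_neg hlt]
      rw [range_map_last] at hlt
      constructor
      · rintro hmem
        rcases List.mem_map.mp hmem with ⟨j, _, hj⟩
        exact ⟨j, hj⟩
      · rintro ⟨j, hj⟩
        refine List.mem_map.mpr ⟨j, List.mem_range.mpr ?_, hj⟩
        by_contra hge
        have : fibA (k + 1) < fibA j := fibA_strictMono (show k + 1 < j by omega)
        omega

theorem is_fibonacci_iff (num : Int) : is_fibonacci num = true ↔ ∃ j, fibA j = num := by
  unfold is_fibonacci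
  rw [show [1, 2] = (List.range (0 + 2)).map fibA by decide]
  rw [List.contains_iff_mem]
  exact mem_pvFibLoop num num.toNat 0 (by simp only [show fibA (0 + 1) = 2 from rfl]; omega)

theorem pvMarkLoop_length (n : Int) :
    ∀ t a b (signs : List Char), (pvMarkLoop n t a b signs).length = signs.length := by
  intro t
  induction t with
  | zero => intro a b signs; rfl
  | succ t ih =>
    intro a b signs
    rw [pvMarkLoop]
    by_cases h : a ≤ n
    · rw [if_pos h, ih]; simp
    · rw [if_neg h]

theorem pvMarkLoop_getElem_neg (n : Int) :
    ∀ t k (signs : List Char) (i : Nat) (hi : i < signs.length),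
      (n + 1 - fibA k).toNat ≤ t → (¬ ∃ j, k ≤ j ∧ fibA j = (i : Int) + 1) →
      (pvMarkLoop n t (fibA k) (fibA (k + 1)) signs)[i]'(by rw [pvMarkLoop_length]; exact hi)
        = signs[i] := by
  intro t
  induction t with
  | zero => intro k signs i hi hm hno; rfl
  | succ t ih =>
    intro k signs i hi hm hno
    by_cases hle : fibA k ≤ n
    · have h1 := (fibA_grow k).1
      have h2 := (fibA_grow k).2
      have hni : (fibA k - 1).toNat ≠ i := by
        intro hcontra
        exact hno ⟨k, le_rfl, by omega⟩
      have e1 : pvMarkLoop n (t + 1) (fibA k) (fibA (k + 1)) signs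
          = pvMarkLoop n t (fibA (k + 1)) (fibA (k + 1 + 1))
              (signs.set (fibA k - 1).toNat '+') := by
        rw [pvMarkLoop, if_pos hle, fibA_step]
      rw [List.getElem_of_eq e1]
      rw [ih (k + 1) _ i (by simpa using hi) (by omega)
        (fun ⟨j, hkj, hj⟩ => hno ⟨j, by omega, hj⟩)]
      exact List.getElem_set_ne hni _
    · have e2 : pvMarkLoop n (t + 1) (fibA k) (fibA (k + 1)) signs = signs := by
        rw [pvMarkLoop, if_neg hle]
      exact List.getElem_of_eq e2 _

theorem pvMarkLoop_getElem_pos (n : Int) :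
    ∀ t k (signs : List Char) (i : Nat) (hi : i < signs.length)
      (hn : (signs.length : Int) ≤ n),
      (n + 1 - fibA k).toNat ≤ t → (∃ j, k ≤ j ∧ fibA j = (i : Int) + 1) →
      (pvMarkLoop n t (fibA k) (fibA (k + 1)) signs)[i]'(by rw [pvMarkLoop_length]; exact hi)
        = '+' := by
  intro t
  induction t with
  | zero =>
    intro k signs i hi _hn hm ⟨j, hkj, hj⟩
    exfalso
    have h1 := (fibA_grow k).1
    have : fibA k ≤ fibA j := fibA_ge_of_le j k hkj
    omega
  | succ t ih =>
    intro k signs i hi hn hm ⟨j, hkj, hj⟩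
    have h1 := (fibA_grow k).1
    have h2 := (fibA_grow k).2
    have hkj' : fibA k ≤ fibA j := fibA_ge_of_le j k hkj
    have hle : fibA k ≤ n := by omega
    have e1 : pvMarkLoop n (t + 1) (fibA k) (fibA (k + 1)) signs
        = pvMarkLoop n t (fibA (k + 1)) (fibA (k + 1 + 1))
            (signs.set (fibA k - 1).toNat '+') := by
      rw [pvMarkLoop, if_pos hle, fibA_step]
    rw [List.getElem_of_eq e1]
    by_cases hnext : ∃ j', k + 1 ≤ j' ∧ fibA j' = (i : Int) + 1
    · exact ih (k + 1) _ i (by simpa using hi) (by simpa using hn) (by omega) hnext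
    · have hjk : j = k := by
        by_contra hne
        exact hnext ⟨j, by omega, hj⟩
      subst hjk
      have hidx : (fibA j - 1).toNat = i := by omega
      rw [pvMarkLoop_getElem_neg n t (j + 1) _ i (by simpa using hi) (by omega) hnext]
      rw [List.getElem_set]
      rw [if_pos hidx]

theorem generate_signs_toList (n : Int) :
    (generate_signs n).toList
      = (PySem.List.pyRange 1 (n + 1) 1).map (fun i => if is_fibonacci i then '+' else '-') := by
  unfold generate_signs
  rw [PySem.List.foldl_append_singleton_eq_map, List.nil_append]
  rw [PySem.Str.toList_join]
  have : ((PySem.List.pyRange 1 (n + 1) 1).map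
        (fun i => if is_fibonacci i then "+" else "-")).map String.toList
      = ((PySem.List.pyRange 1 (n + 1) 1).map
        (fun i => if is_fibonacci i then '+' else '-')).map (fun c => [c]) := by
    simp only [List.map_map]
    refine List.map_congr_left fun i _ => ?_
    by_cases h : is_fibonacci i <;> simp [h]
  rw [this]
  simpa using PySem.Chars.join_nil_singletons
    ((PySem.List.pyRange 1 (n + 1) 1).map (fun i => if is_fibonacci i then '+' else '-'))

-- ===== VERDICT (by name: the statement is the Claim_ definition above) =====
theorem generate_signs_spec : Claim_equal_generate_signs := by
  unfold Claim_equal_generate_signs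
  intro n _
  unfold Spec_generate_signs
  apply String.toList_inj.mp
  rw [generate_signs_toList]
  unfold generate_signs_alt
  rw [String.toList_ofList]
  apply List.ext_getElem
  · rw [pvMarkLoop_length]
    simp [PySem.List.length_pyRange_one]
  · intro i hiA hiB
    have hlenB : (pvMarkLoop n n.toNat 1 2 (List.replicate n.toNat '-')).length
        = n.toNat := by rw [pvMarkLoop_length]; simp
    have hi : i < n.toNat := by omega
    have hn0 : 0 < n := by omega
    have hgA : (PySem.List.pyRange 1 (n + 1) 1)[i]'(by
        rw [PySem.List.length_pyRange_one]; omega) = 1 + (i : Int) :=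
      PySem.List.getElem_pyRange_one _ _ _ _
    rw [List.getElem_map]
    have hB : pvMarkLoop n n.toNat 1 2 (List.replicate n.toNat '-')
        = pvMarkLoop n n.toNat (fibA 0) (fibA 1) (List.replicate n.toNat '-') := rfl
    rw [List.getElem_of_eq hB]
    by_cases hF : ∃ j, fibA j = (i : Int) + 1
    · have hA : is_fibonacci ((PySem.List.pyRange 1 (n + 1) 1)[i]'(by
          rw [PySem.List.length_pyRange_one]; omega)) = true := by
        rw [hgA, is_fibonacci_iff]
        rcases hF with ⟨j, hj⟩
        exact ⟨j, by omega⟩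
      rw [hA, if_pos rfl]
      rw [pvMarkLoop_getElem_pos n n.toNat 0 _ i (by simpa using hi)
        (by simp; omega) (by simp only [show fibA 0 = 1 from rfl]; omega)
        (by rcases hF with ⟨j, hj⟩; exact ⟨j, Nat.zero_le j, hj⟩)]
    · have hA : is_fibonacci ((PySem.List.pyRange 1 (n + 1) 1)[i]'(by
          rw [PySem.List.length_pyRange_one]; omega)) = false := by
        rw [hgA]
        apply Bool.eq_false_iff.mpr
        intro hc
        rcases (is_fibonacci_iff _).mp hc with ⟨j, hj⟩
        exact hF ⟨j, by omega⟩
      rw [hA]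
      simp only [Bool.false_eq_true, if_false]
      rw [pvMarkLoop_getElem_neg n n.toNat 0 _ i (by simpa using hi)
        (by simp only [show fibA 0 = 1 from rfl]; omega) (fun ⟨j, _, hj⟩ => hF ⟨j, hj⟩)]
      exact (List.getElem_replicate _).symm
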